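-- pv_equiv track=rewrite | github.com/colinsongf/canonicity_old | affiliation/utils.py | get_word_shape
-- ===== SOURCE A (Python) =====
-- def get_word_shape(token):
-- 	shape = []
-- 	for c in token:
-- 		if c.isalpha():
-- 			if c.isupper():
-- 				shape.append("X")
-- 			else:
-- 				shape.append("x")
-- 		elif c.isdigit():
-- 			shape.append("d")
-- 		else:
-- 			shape.append(c)
-- 	suffix = []
-- 	if len(token) > 2:
-- 		suffix = shape[-2:]
-- 	elif len(token) > 1:
-- 		suffix = shape[-1:]
--
-- 	middle = []
-- 	if len(shape) > 3:
-- 		c = shape[1]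
-- 		i = 1
-- 		while i < len(shape) - 2:
-- 			middle.append(c)
-- 			while c == shape[i] and i < len(shape) -2:
-- 				i += 1
-- 			c = shape[i]
--
-- 		if c != middle[-1]:
-- 			middle.append(c)
--
-- 	return "".join([shape[0]] + middle + suffix)
-- ===== SOURCE B (Python) =====
-- def get_word_shape(token):
--     n = len(token)
--
--     def sc(c):
--         if c.isalpha():
--             return "X" if c.isupper() else "x"
--         if c.isdigit():
--             return "d"
--         return c
--
--     rev = []  # the output, built back-to-front
--     if n > 2:
--         rev.append(sc(token[n - 1]))
--         rev.append(sc(token[n - 2]))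
--     elif n == 2:
--         rev.append(sc(token[1]))
--     if n > 3:
--         prev = None
--         for i in range(n - 2, 0, -1):
--             ch = sc(token[i])
--             if ch != prev:
--                 rev.append(ch)
--                 prev = ch
--     rev.append(sc(token[0]))
--     return "".join(reversed(rev))
-- ===== Notes on version B (the rewrite author's own statement) =====
-- stated objective: alternative
-- what changed: B never builds A's shape list or walks it forward with an inner skip loop and a correction append: it constructs the output back-to-front in a single reverse pass over the token (tail chars first, then the middle scanned right-to-left emitting a shape char only when it differs from the previously emitted one, then the head char), reversing once at the end.
-- outside the precondition, e.g. on get_word_shape(''): A raises IndexError, B raises IndexError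
import Mathlib
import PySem

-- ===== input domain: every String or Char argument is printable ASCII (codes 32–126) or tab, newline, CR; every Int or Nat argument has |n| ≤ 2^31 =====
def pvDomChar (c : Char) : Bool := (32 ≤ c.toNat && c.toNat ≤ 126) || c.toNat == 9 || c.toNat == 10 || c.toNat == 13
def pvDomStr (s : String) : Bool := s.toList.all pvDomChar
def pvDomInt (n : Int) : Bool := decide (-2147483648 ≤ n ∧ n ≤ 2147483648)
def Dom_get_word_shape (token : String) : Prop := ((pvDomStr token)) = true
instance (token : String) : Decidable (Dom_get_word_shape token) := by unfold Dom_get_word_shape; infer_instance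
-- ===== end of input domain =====

-- B builds the output BACK-TO-FRONT in one reverse pass over the token (no shape
-- list, no index-walking forward loop with inner skip loop); objective: alternative.

-- ===== PORT A =====

-- char→shape-char mapping (the if/elif chain both Pythons use on each character)
def shapeChar (c : Char) : Char :=
  if PySem.Chars.isalpha c then
    (if PySem.Chars.isupper c then 'X' else 'x')
  else if PySem.Chars.isdigit c then 'd'
  else c

-- A's inner `while c == shape[i] and i < len(shape) - 2: i += 1`
def skipA (shape : List Char) (c : Char) (i : Nat) : Nat :=
  if h : c = shape.getD i ' ' ∧ i < shape.length - 2 then skipA shape c (i + 1) else i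
termination_by shape.length - 2 - i
decreasing_by omega

-- A's outer `while i < len(shape) - 2` loop, returning (middle, c); the fuel
-- only makes the loop total (i strictly increases, so fuel = len(shape) suffices)
def outerA (shape : List Char) : Nat → Nat → Char → List Char → List Char × Char
  | 0, _, c, middle => (middle, c)
  | fuel + 1, i, c, middle =>
    if i < shape.length - 2 then
      let i' := skipA shape c i
      outerA shape fuel i' (shape.getD i' ' ') (middle ++ [c])
    else (middle, c)

def get_word_shape (token : String) : String :=
  let shape := token.toList.foldl (fun sh c => sh ++ [shapeChar c]) []
  let suffix :=
    if token.length > 2 then PySem.List.slice shape (some (-2)) none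
    else if token.length > 1 then PySem.List.slice shape (some (-1)) none
    else []
  let middle :=
    if shape.length > 3 then
      let r := outerA shape shape.length 1 (shape.getD 1 ' ') []
      if r.2 ≠ r.1.getLastD ' ' then r.1 ++ [r.2] else r.1
    else []
  String.mk ([shape.getD 0 ' '] ++ middle ++ suffix)

-- ===== PORT B =====

-- B: one backward pass `for i in range(n-2, 0, -1)` appending to `rev` (the
-- reversed output) only when the shape char differs from the previous one;
-- every token[j] index B reaches is in range, so pyGet? … .getD ' ' is exact
def get_word_shape_alt (token : String) : String :=
  let l := token.toList
  let n := l.length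
  let rev0 : List Char :=
    if n > 2 then
      [shapeChar ((PySem.List.pyGet? l ((n : Int) - 1)).getD ' '),
       shapeChar ((PySem.List.pyGet? l ((n : Int) - 2)).getD ' ')]
    else if n = 2 then [shapeChar ((PySem.List.pyGet? l 1).getD ' ')]
    else []
  let st :=
    if n > 3 then
      (PySem.List.pyRange ((n : Int) - 2) 0 (-1)).foldl
        (fun (st : List Char × Option Char) i =>
          let ch := shapeChar ((PySem.List.pyGet? l i).getD ' ')
          if some ch ≠ st.2 then (st.1 ++ [ch], some ch) else st)
        (rev0, none)
    else (rev0, (none : Option Char))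
  String.mk ((st.1 ++ [shapeChar ((PySem.List.pyGet? l 0).getD ' ')]).reverse)

-- ===== PRECONDITION & SPEC =====
-- Pre_ excludes only the empty token, on which A raises IndexError at shape[0]
def Pre_get_word_shape (token : String) : Prop := token ≠ ""
instance (token : String) : Decidable (Pre_get_word_shape token) := by
  unfold Pre_get_word_shape; infer_instance

def pvWitness_get_word_shape : String := "Ab"

def Spec_get_word_shape (token : String) (out : String) : Prop := out = get_word_shape_alt token
instance (token : String) (out : String) : Decidable (Spec_get_word_shape token out) := by
  unfold Spec_get_word_shape; infer_instance

-- ===== CLAIM (what is proved, stated in full; the proofs are below) =====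
def Claim_equal_get_word_shape : Prop := ∀ (token : String), Dom_get_word_shape token → Pre_get_word_shape token → Spec_get_word_shape token (get_word_shape token)

-- ===== LEMMAS AND PROOFS =====

-- canonical form both sides are reduced to: head, run-collapsed middle, tail
def collapseAux (p : Char) : List Char → List Char
  | [] => []
  | a :: rest => if a = p then collapseAux p rest else a :: collapseAux a rest

def collapse : List Char → List Char
  | [] => []
  | a :: rest => a :: collapseAux a rest

theorem foldl_shape (l acc : List Char) :
    l.foldl (fun sh c => sh ++ [shapeChar c]) acc = acc ++ l.map shapeChar := by
  induction l generalizing acc with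
  | nil => simp
  | cons a t ih => simp [List.foldl, ih]

theorem skipA_spec (shape : List Char) (c : Char) (i : Nat) (h : i ≤ shape.length - 2) :
    i ≤ skipA shape c i ∧ skipA shape c i ≤ shape.length - 2 ∧
      (∀ k, i ≤ k → k < skipA shape c i → shape.getD k ' ' = c) ∧
      (skipA shape c i < shape.length - 2 → shape.getD (skipA shape c i) ' ' ≠ c) := by
  fun_induction skipA shape c i with
  | case1 i h1 ih =>
    have ih' := ih (by omega)
    refine ⟨by omega, ih'.2.1, ?_, ih'.2.2.2⟩
    intro k hk1 hk2
    rcases Nat.eq_or_lt_of_le hk1 with rfl | hlt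
    · exact h1.1.symm
    · exact ih'.2.2.1 k hlt hk2
  | case2 i h1 =>
    refine ⟨le_refl _, h, by omega, ?_⟩
    intro hlt hc
    exact h1 ⟨hc.symm, hlt⟩

theorem skipA_gt (shape : List Char) (c : Char) (i : Nat)
    (h1 : c = shape.getD i ' ') (h2 : i < shape.length - 2) : i < skipA shape c i := by
  rw [skipA, dif_pos ⟨h1, h2⟩]
  have := (skipA_spec shape c (i + 1) (by omega)).1
  omega

theorem collapseAux_eq_collapse (c : Char) (rest : List Char)
    (h : ∀ x, rest.head? = some x → x ≠ c) : collapseAux c rest = collapse rest := by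
  cases rest with
  | nil => rfl
  | cons a t =>
    have : a ≠ c := h a rfl
    simp [collapseAux, collapse, this]

theorem collapseAux_replicate (c : Char) (k : Nat) (rest : List Char) :
    collapseAux c (List.replicate k c ++ rest) = collapseAux c rest := by
  induction k with
  | zero => simp
  | succ m ih => simpa [List.replicate_succ, collapseAux] using ih

theorem collapse_replicate (c : Char) (k : Nat) (rest : List Char) (hk : 1 ≤ k)
    (h : ∀ x, rest.head? = some x → x ≠ c) :
    collapse (List.replicate k c ++ rest) = c :: collapse rest := by
  obtain ⟨m, rfl⟩ : ∃ m, k = m + 1 := ⟨k - 1, by omega⟩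
  simp only [List.replicate_succ, List.cons_append, collapse]
  rw [collapseAux_replicate, collapseAux_eq_collapse c rest h]
  rfl

theorem outerA_spec (l : List Char) (fuel : Nat) : ∀ (i : Nat) (c : Char) (m : List Char),
    i ≤ l.length - 2 → c = l.getD i ' ' → l.length - 2 - i < fuel →
    outerA l fuel i c m =
      (m ++ collapse ((l.drop i).take (l.length - 2 - i)), l.getD (l.length - 2) ' ') := by
  induction fuel with
  | zero => intro i c m h1 h2 h3; omega
  | succ fuel ih =>
    intro i c m h1 h2 h3
    by_cases hi : i < l.length - 2
    · have hstep : outerA l (fuel + 1) i c m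
          = outerA l fuel (skipA l c i) (l.getD (skipA l c i) ' ') (m ++ [c]) := by
        simp [outerA, hi]
      obtain ⟨hj1, hj2, hj3, hj4⟩ := skipA_spec l c i (by omega)
      have hgt := skipA_gt l c i h2 hi
      generalize hJ : skipA l c i = j at hstep hj1 hj2 hj3 hj4 hgt
      rw [hstep, ih j (l.getD j ' ') (m ++ [c]) hj2 rfl (by omega)]
      have hseg : (l.drop i).take (l.length - 2 - i) =
          List.replicate (j - i) c ++ (l.drop j).take (l.length - 2 - j) := by
        apply List.ext_getElem
        · simp only [List.length_take, List.length_drop, List.length_append,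
            List.length_replicate]
          omega
        · intro t ht1 ht2
          simp only [List.length_take, List.length_drop] at ht1
          simp only [List.getElem_take, List.getElem_drop]
          rw [List.getElem_append]
          split
          · rename_i hlt
            simp only [List.length_replicate] at hlt
            rw [List.getElem_replicate]
            have := hj3 (i + t) (by omega) (by omega)
            rw [List.getD_eq_getElem l ' ' (by omega)] at this
            exact this
          · rename_i hge
            simp only [List.length_replicate] at hge
            simp only [List.getElem_take, List.getElem_drop]
            congr 1
            simp only [List.length_replicate]
            omega
      rw [hseg, collapse_replicate c (j - i) _ (by omega)]
      · simp
      · intro x hx hxc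
        have hjlt : j < l.length - 2 := by
          by_contra hge
          have hz : l.length - 2 - j = 0 := by omega
          rw [hz] at hx
          simp at hx
        have hne := hj4 hjlt
        rw [List.getD_eq_getElem l ' ' (by omega)] at hne
        have hhead : ((l.drop j).take (l.length - 2 - j)).head? = some l[j] := by
          have hlen : 0 < ((l.drop j).take (l.length - 2 - j)).length := by
            simp only [List.length_take, List.length_drop]
            omega
          rw [List.head?_eq_getElem?, List.getElem?_eq_getElem hlen]
          simp [List.getElem_take]
        rw [hhead] at hx
        cases hx
        exact hne hxc
    · have hieq : i = l.length - 2 := by omega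
      subst hieq
      simp [outerA, collapse, h2]

theorem collapseAux_append_last (p : Char) (t : List Char) (a : Char) :
    collapseAux p (t ++ [a]) =
      if a = t.getLastD p then collapseAux p t else collapseAux p t ++ [a] := by
  induction t generalizing p with
  | nil => simp [collapseAux]
  | cons b t ih =>
    by_cases hb : b = p
    · subst hb
      simp only [List.cons_append, collapseAux, if_pos, List.getLastD_cons]
      exact ih b
    · simp only [List.cons_append, collapseAux, if_neg hb, List.getLastD_cons]
      rw [ih b]
      split <;> simp

theorem collapseAux_getLastD (p : Char) (t : List Char) :
    (collapseAux p t).getLastD p = t.getLastD p := by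
  induction t generalizing p with
  | nil => rfl
  | cons b t ih =>
    by_cases hb : b = p
    · subst hb
      simp only [collapseAux, if_pos, List.getLastD_cons]
      exact ih b
    · simp only [collapseAux, if_neg hb, List.getLastD_cons]
      exact ih b

theorem collapse_snoc (x : Char) (t : List Char) (a : Char) :
    collapse ((x :: t) ++ [a]) =
      if a = (collapse (x :: t)).getLastD ' ' then collapse (x :: t)
      else collapse (x :: t) ++ [a] := by
  have h1 : (collapse (x :: t)).getLastD ' ' = t.getLastD x := by
    simp only [collapse, List.getLastD_cons]
    exact collapseAux_getLastD x t
  rw [h1]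
  simp only [collapse, List.cons_append, collapseAux_append_last x t a]
  split <;> rfl

theorem string_ne_toList (token : String) (h : token ≠ "") : token.toList ≠ [] := by
  simpa using h

theorem main_aux (l : List Char) (hne : l ≠ []) :
    String.mk ([l.getD 0 ' '] ++
      (if l.length > 3 then
        (let r := outerA l l.length 1 (l.getD 1 ' ') []
         if r.2 ≠ r.1.getLastD ' ' then r.1 ++ [r.2] else r.1)
       else []) ++
      (if l.length > 2 then PySem.List.slice l (some (-2)) none
       else if l.length > 1 then PySem.List.slice l (some (-1)) none else [])) =
    (if l.length < 4 then String.mk (l.getD 0 ' ' :: l.drop 1)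
     else String.mk (l.getD 0 ' ' ::
       (collapse ((l.drop 1).take (l.length - 2)) ++ l.drop (l.length - 2)))) := by
  have hpos : 0 < l.length := List.length_pos_of_ne_nil hne
  by_cases h4 : l.length < 4
  · rw [if_pos h4, if_neg (by omega : ¬ l.length > 3)]
    by_cases h2 : l.length > 2
    · rw [if_pos h2, PySem.List.slice_from_neg_ofNat l 2 (by omega)]
      rw [(by omega : l.length - 2 = 1)]
      simp
    · by_cases h1 : l.length > 1
      · rw [if_neg h2, if_pos h1, PySem.List.slice_from_neg_one]
        rw [(by omega : l.length - 1 = 1)]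
        simp
      · rw [if_neg h2, if_neg h1]
        have hd : l.drop 1 = [] := by
          apply List.drop_eq_nil_of_le
          omega
        simp [hd]
  · rw [if_neg h4, if_pos (by omega : l.length > 3), if_pos (by omega : l.length > 2)]
    rw [PySem.List.slice_from_neg_ofNat l 2 (by omega)]
    rw [outerA_spec l l.length 1 (l.getD 1 ' ') [] (by omega) rfl (by omega)]
    simp only [List.nil_append]
    rw [(by omega : l.length - 2 - 1 = l.length - 3)]
    rw [(by omega : l.length - 2 = l.length - 3 + 1)]
    have hne1 : (l.drop 1).take (l.length - 3) ≠ [] := by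
      apply List.ne_nil_of_length_pos
      simp only [List.length_take, List.length_drop]
      omega
    have hsnoc : (l.drop 1).take (l.length - 3 + 1) =
        (l.drop 1).take (l.length - 3) ++ [l.getD (l.length - 3 + 1) ' '] := by
      rw [List.take_add_one]
      have e2 : (l.drop 1)[l.length - 3]? = some (l.getD (l.length - 3 + 1) ' ') := by
        rw [List.getElem?_drop, (by omega : 1 + (l.length - 3) = l.length - 3 + 1),
          List.getElem?_eq_getElem (by omega : l.length - 3 + 1 < l.length),
          List.getD_eq_getElem l ' ' (by omega)]
      rw [e2]
      rfl
    rw [hsnoc]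
    obtain ⟨x, t, hxt⟩ := List.exists_cons_of_ne_nil hne1
    rw [hxt, collapse_snoc]
    by_cases hc : l.getD (l.length - 3 + 1) ' ' = (collapse (x :: t)).getLastD ' '
    · rw [if_pos hc, if_neg (by simpa using hc)]
      simp
    · rw [if_neg hc, if_pos (by simpa using hc)]
      simp

-- ---- B-side lemmas ----

-- the value B's backward loop appends, as a function of the pending `prev`
def dedupFrom (p : Option Char) : List Char → List Char
  | [] => []
  | a :: t => if some a ≠ p then a :: dedupFrom (some a) t else dedupFrom p t

theorem dedupFrom_some (p : Char) (cs : List Char) :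
    dedupFrom (some p) cs = collapseAux p cs := by
  induction cs generalizing p with
  | nil => rfl
  | cons a t ih =>
    by_cases h : a = p
    · subst h
      simp [dedupFrom, collapseAux, ih]
    · have : some a ≠ some p := by simpa using h
      simp [dedupFrom, collapseAux, h, this, ih]

theorem dedupFrom_none (cs : List Char) : dedupFrom none cs = collapse cs := by
  cases cs with
  | nil => rfl
  | cons a t => simp [dedupFrom, collapse, dedupFrom_some]

theorem collapse_reverse (m : List Char) : collapse m.reverse = (collapse m).reverse := by
  induction m with
  | nil => rfl
  | cons x t ih =>
    cases t with
    | nil => rfl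
    | cons y t' =>
      have hne : (y :: t').reverse ≠ [] := by simp
      obtain ⟨a, r, har⟩ := List.exists_cons_of_ne_nil hne
      have hlast : ((collapse (y :: t')).reverse).getLastD ' ' = y := by
        rw [List.getLastD_eq_getLast?, List.getLast?_reverse]
        simp [collapse]
      rw [List.reverse_cons, har, collapse_snoc, ← har, ih, hlast]
      by_cases hx : x = y
      · subst hx
        rw [if_pos rfl]
        simp [collapse, collapseAux]
      · rw [if_neg hx]
        simp only [collapse, collapseAux, if_neg (Ne.symm hx), List.reverse_cons,
          List.append_assoc]

theorem foldB_map (cs : List Int) (g : Int → Char) :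
    ∀ (rev : List Char) (prev : Option Char),
    (cs.foldl
      (fun (st : List Char × Option Char) i =>
        let ch := g i
        if some ch ≠ st.2 then (st.1 ++ [ch], some ch) else st) (rev, prev)).1
      = rev ++ dedupFrom prev (cs.map g) := by
  induction cs with
  | nil => intro rev prev; simp [dedupFrom]
  | cons a t ih =>
    intro rev prev
    by_cases h : some (g a) ≠ prev
    · simp only [List.foldl, List.map, if_pos h, dedupFrom, ih]
      simp
    · simp only [List.foldl, List.map, if_neg h, dedupFrom, ih]

theorem b_middle_chars (l : List Char) (h4 : l.length > 3) :
    (PySem.List.pyRange ((l.length : Int) - 2) 0 (-1)).map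
        (fun i => shapeChar ((PySem.List.pyGet? l i).getD ' '))
      = (((l.map shapeChar).drop 1).take (l.length - 2)).reverse := by
  rw [PySem.List.pyRange_neg_one_eq_reverse, List.map_reverse]
  congr 1
  apply List.ext_getElem
  · simp only [List.length_map, PySem.List.length_pyRange_one,
      List.length_take, List.length_drop, List.length_map]
    omega
  · intro k hk1 hk2
    simp only [List.length_map, PySem.List.length_pyRange_one] at hk1
    have hk : k < l.length - 2 := by omega
    simp only [List.getElem_map, PySem.List.getElem_pyRange_one]
    have hidx : (0 : Int) + 1 + k = ((k + 1 : Nat) : Int) := by push_cast; ring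
    rw [hidx, PySem.List.pyGet?_natCast,
      List.getElem?_eq_getElem (by omega : k + 1 < l.length)]
    simp [List.getElem_take]

theorem alt_aux (token : String) (hpre : token ≠ "") :
    get_word_shape_alt token =
      (if (token.toList.map shapeChar).length < 4 then
        String.mk ((token.toList.map shapeChar).getD 0 ' ' :: (token.toList.map shapeChar).drop 1)
       else String.mk ((token.toList.map shapeChar).getD 0 ' ' ::
        (collapse (((token.toList.map shapeChar).drop 1).take ((token.toList.map shapeChar).length - 2))
          ++ (token.toList.map shapeChar).drop ((token.toList.map shapeChar).length - 2)))) := by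
  have hne := string_ne_toList token hpre
  set l := token.toList with hl
  set s := l.map shapeChar with hs
  have hpos : 0 < l.length := List.length_pos_of_ne_nil hne
  have hls : s.length = l.length := by simp [hs]
  have hget : ∀ k, k < l.length → shapeChar ((PySem.List.pyGet? l ((k : Nat) : Int)).getD ' ') = s.getD k ' ' := by
    intro k hk
    rw [PySem.List.pyGet?_natCast, List.getElem?_eq_getElem hk,
      List.getD_eq_getElem s ' ' (show k < s.length by omega)]
    simp [hs]
  unfold get_word_shape_alt
  simp only [← hl]
  by_cases h4 : l.length > 3
  · rw [if_neg (by omega : ¬ s.length < 4)]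
    rw [if_pos (by omega : l.length > 2), if_pos h4]
    rw [foldB_map _ (fun i => shapeChar ((PySem.List.pyGet? l i).getD ' '))]
    rw [b_middle_chars l h4, ← hs, dedupFrom_none, collapse_reverse]
    have e1 : ((l.length : Int) - 1) = (((l.length - 1 : Nat)) : Int) := by omega
    have e2 : ((l.length : Int) - 2) = (((l.length - 2 : Nat)) : Int) := by omega
    rw [e1, e2]
    have g1 := hget (l.length - 1) (by omega)
    have g2 := hget (l.length - 2) (by omega)
    rw [g1, g2]
    have g0' : shapeChar ((PySem.List.pyGet? l 0).getD ' ') = s.getD 0 ' ' := by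
      have := hget 0 (by omega)
      simpa using this
    rw [g0']
    have hdrop : s.drop (l.length - 2) = [s.getD (l.length - 2) ' ', s.getD (l.length - 1) ' '] := by
      apply List.ext_getElem
      · simp only [List.length_drop, List.length_cons, List.length_nil]; omega
      · intro k hk1 hk2
        simp only [List.length_drop] at hk1
        have hk' : k < 2 := by omega
        rw [List.getElem_drop]
        interval_cases k
        · simp only [List.getElem_cons_zero]
          rw [List.getD_eq_getElem s ' ' (by omega)]
          congr 1
        · simp only [List.getElem_cons_succ, List.getElem_cons_zero]
          rw [List.getD_eq_getElem s ' ' (by omega)]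
          congr 1; omega
    rw [hls, hdrop]
    simp only [List.reverse_append, List.reverse_cons, List.reverse_reverse,
      List.reverse_nil, List.nil_append, List.append_assoc]
    congr 1
  · rw [if_pos (by omega : s.length < 4)]
    have g0 : shapeChar ((PySem.List.pyGet? l 0).getD ' ') = s.getD 0 ' ' := by
      have := hget 0 (by omega)
      simpa using this
    rw [if_neg (by omega : ¬ l.length > 3)]
    by_cases h2 : l.length > 2
    · rw [if_pos h2]
      have e1 : ((l.length : Int) - 1) = (((l.length - 1 : Nat)) : Int) := by omega
      have e2 : ((l.length : Int) - 2) = (((l.length - 2 : Nat)) : Int) := by omega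
      rw [e1, e2]
      have g1 := hget (l.length - 1) (by omega)
      have g2 := hget (l.length - 2) (by omega)
      rw [g1, g2, g0]
      have hlen3 : l.length = 3 := by omega
      have hdrop : s.drop 1 = [s.getD (l.length - 2) ' ', s.getD (l.length - 1) ' '] := by
        apply List.ext_getElem
        · simp only [List.length_drop, List.length_cons, List.length_nil]; omega
        · intro k hk1 hk2
          simp only [List.length_drop, hls, hlen3] at hk1
          rw [List.getElem_drop]
          interval_cases k
          · simp only [List.getElem_cons_zero]
            rw [List.getD_eq_getElem s ' ' (by omega)]
            congr 1; omega
          · simp only [List.getElem_cons_succ, List.getElem_cons_zero]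
            rw [List.getD_eq_getElem s ' ' (by omega)]
            congr 1; omega
      rw [hdrop]
      simp
    · by_cases h1 : l.length = 2
      · rw [if_neg h2, if_pos h1]
        have g1 : shapeChar ((PySem.List.pyGet? l 1).getD ' ') = s.getD 1 ' ' := by
          have := hget 1 (by omega)
          simpa using this
        rw [g1, g0]
        have hdrop : s.drop 1 = [s.getD 1 ' '] := by
          apply List.ext_getElem
          · simp only [List.length_drop, List.length_cons, List.length_nil]; omega
          · intro k hk1 hk2
            simp only [List.length_drop, hls, h1] at hk1
            rw [List.getElem_drop]
            interval_cases k
            simp only [List.getElem_cons_zero]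
            rw [List.getD_eq_getElem s ' ' (by omega)]
        rw [hdrop]
        simp
      · rw [if_neg h2, if_neg h1]
        rw [g0]
        have hdrop : s.drop 1 = [] := by
          apply List.drop_eq_nil_of_le
          omega
        rw [hdrop]
        simp

-- ===== VERDICT (by name: the statement is the Claim_ definition above) =====
theorem get_word_shape_spec : Claim_equal_get_word_shape := by
  intro token _ hpre
  unfold Spec_get_word_shape
  have hne : token.toList.map shapeChar ≠ [] := by
    simpa using string_ne_toList token hpre
  have hlen : token.length = (token.toList.map shapeChar).length := by simp
  rw [alt_aux token hpre]
  simp only [get_word_shape, foldl_shape, List.nil_append, hlen]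
  exact main_aux (token.toList.map shapeChar) hne
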